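-- pv_equiv track=rewrite | github.com/ROCm/TheRock | analyze_build_topology.py | calculate_build_levels
-- ===== SOURCE A (Python) =====
-- from typing import Dict, List, Set, Tuple
--
-- def calculate_build_levels(artifact_deps: Dict[str, List[str]]) -> Dict[str, int]:
--     """Calculate build level for each artifact (topological ordering)"""
--     levels = {}
--     visited = set()
--
--     def get_level(artifact: str) -> int:
--         if artifact in visited:
--             return levels.get(artifact, 0)
--
--         visited.add(artifact)
--         deps = artifact_deps.get(artifact, [])
--
--         if not deps:
--             levels[artifact] = 0
--             return 0
--
--         max_dep_level = max(get_level(dep) for dep in deps if dep in artifact_deps)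
--         levels[artifact] = max_dep_level + 1
--         return levels[artifact]
--
--     for artifact in artifact_deps.keys():
--         get_level(artifact)
--
--     return levels
-- ===== SOURCE B (Python) =====
-- def calculate_build_levels(artifact_deps):
--     """Calculate build level for each artifact (topological ordering) — iterative DFS with an explicit stack."""
--     levels = {}
--     in_progress = set()
--     for root in artifact_deps:
--         if root in levels:
--             continue
--         in_progress.add(root)
--         stack = [(root, list(artifact_deps[root]))]
--         while stack:
--             node, rest = stack.pop()
--             pushed = False
--             while rest:
--                 d, rest = rest[0], rest[1:]
--                 if d in artifact_deps and d not in levels and d not in in_progress: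
--                     stack.append((node, rest))
--                     stack.append((d, list(artifact_deps[d])))
--                     in_progress.add(d)
--                     pushed = True
--                     break
--             if pushed:
--                 continue
--             deps = artifact_deps[node]
--             if deps:
--                 levels[node] = max(levels.get(d, 0) for d in deps if d in artifact_deps) + 1
--             else:
--                 levels[node] = 0
--             in_progress.discard(node)
--     return levels
-- ===== Notes on version B (the rewrite author's own statement) =====
-- stated objective: alternative
-- what changed: A's memoized recursive DFS (nested get_level with a visited set) is replaced by an iterative DFS with an explicit frame stack and an in-progress set, finalizing each node's level in post-order by re-reading finished levels from the dict instead of accumulating returned values.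
import Mathlib
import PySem

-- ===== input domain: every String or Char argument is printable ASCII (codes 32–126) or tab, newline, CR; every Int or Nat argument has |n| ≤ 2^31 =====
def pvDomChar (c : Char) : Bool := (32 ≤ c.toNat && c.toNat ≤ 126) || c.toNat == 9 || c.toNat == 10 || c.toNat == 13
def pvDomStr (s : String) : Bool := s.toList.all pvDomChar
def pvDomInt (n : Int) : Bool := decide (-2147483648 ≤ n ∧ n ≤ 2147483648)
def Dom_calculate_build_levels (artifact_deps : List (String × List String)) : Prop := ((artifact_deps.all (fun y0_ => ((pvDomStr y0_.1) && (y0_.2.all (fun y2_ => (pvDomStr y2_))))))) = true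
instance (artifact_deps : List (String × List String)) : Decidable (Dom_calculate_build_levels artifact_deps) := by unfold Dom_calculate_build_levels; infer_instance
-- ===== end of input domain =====

-- B replaces A's memoized recursive DFS by an explicit-stack iterative DFS with post-order
-- finalization (objective: alternative decomposition, same asymptotic cost).

-- ===== PORT A =====
-- the input dict: first-match lookup (assoc list in insertion order), `k in artifact_deps`
def depsOf (l : List (String × List String)) (k : String) : List String :=
  ((l.lookup k).getD [])

def isKey (l : List (String × List String)) (k : String) : Bool :=
  l.any (fun p => p.1 == k)

-- get_level / the generator feeding max(...), as a fuel recursion; `none` = the ValueError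
-- of max() on an empty sequence (excluded by Pre_) or fuel exhaustion (never reached: the
-- recursion depth is bounded by the number of distinct keys, see `getLevelA_suff`).
mutual
def getLevelA (l : List (String × List String)) :
    Nat → String → PySem.Dict String Int → PySem.Set String →
    Option (Int × PySem.Dict String Int × PySem.Set String)
  | 0, _, _, _ => none
  | fuel+1, a, lv, vis =>
      if PySem.Set.contains vis a then some (lv.getD a 0, lv, vis)
      else
        let vis' := PySem.Set.add vis a
        let deps := depsOf l a
        if deps.isEmpty then some (0, lv.insert a 0, vis')
        else
          match depLevelsA l fuel deps lv vis' with
          | none => none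
          | some (vals, lv1, vis1) =>
            match PySem.List.max? vals (fun x => x) with
            | none => none
            | some m => some (m + 1, lv1.insert a (m + 1), vis1)
termination_by fuel _ _ _ => (fuel, 0)

def depLevelsA (l : List (String × List String)) :
    Nat → List String → PySem.Dict String Int → PySem.Set String →
    Option (List Int × PySem.Dict String Int × PySem.Set String)
  | _, [], lv, vis => some ([], lv, vis)
  | fuel, d :: ds, lv, vis =>
      if isKey l d then
        match getLevelA l fuel d lv vis with
        | none => none
        | some (v, lv1, vis1) =>
          match depLevelsA l fuel ds lv1 vis1 with
          | none => none
          | some (vs, lv2, vis2) => some (v :: vs, lv2, vis2)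
      else depLevelsA l fuel ds lv vis
termination_by fuel ds _ _ => (fuel, ds.length + 1)
end

-- `for artifact in artifact_deps.keys(): get_level(artifact)`
def runA (l : List (String × List String)) :
    List String → PySem.Dict String Int → PySem.Set String →
    Option (PySem.Dict String Int × PySem.Set String)
  | [], lv, vis => some (lv, vis)
  | a :: as_, lv, vis =>
      match getLevelA l (l.length + 1) a lv vis with
      | none => none
      | some (_, lv1, vis1) => runA l as_ lv1 vis1

def calculate_build_levels (artifact_deps : List (String × List String)) : List (String × Int) :=
  match runA artifact_deps (artifact_deps.map Prod.fst) PySem.Dict.empty PySem.Set.empty with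
  | some (lv, _) => lv.items
  | none => []

-- ===== PORT B =====
-- the inner `while rest:` scan: first dep that is a key, unfinished and not in progress
def scanB (l : List (String × List String)) (lv : PySem.Dict String Int)
    (ip : PySem.Set String) : List String → Option (String × List String)
  | [] => none
  | d :: ds =>
      if isKey l d && !(lv.contains d) && !(PySem.Set.contains ip d) then some (d, ds)
      else scanB l lv ip ds

-- `levels[node] = ...` at pop time; `none` = the ValueError of max() on an empty sequence
def finalizeB (l : List (String × List String)) (node : String)
    (lv : PySem.Dict String Int) : Option (PySem.Dict String Int) :=
  if (depsOf l node).isEmpty then some (lv.insert node 0)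
  else
    match PySem.List.max? (((depsOf l node).filter (fun d => isKey l d)).map (fun d => lv.getD d 0))
        (fun x => x) with
    | none => none
    | some m => some (lv.insert node (m + 1))

-- termination measure: keys that are neither finished nor in progress
def pendingB (l : List (String × List String)) (lv : PySem.Dict String Int)
    (ip : PySem.Set String) : Nat :=
  ((PySem.List.dedup (l.map Prod.fst)).filter
    (fun k => !(lv.contains k) && !(PySem.Set.contains ip k))).length

theorem filterLenLt (base : List String) (p q : String → Bool)
    (h : ∀ a ∈ base, p a = true → q a = true)
    (d : String) (hd : d ∈ base) (hp : p d = false) (hq : q d = true) :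
    (base.filter p).length < (base.filter q).length := by
  induction base with
  | nil => cases hd
  | cons x xs ih =>
      have hmono : ∀ a ∈ xs, p a = true → q a = true := fun a ha => h a (List.mem_cons_of_mem _ ha)
      have hle : (xs.filter p).length ≤ (xs.filter q).length := by
        rw [← List.countP_eq_length_filter, ← List.countP_eq_length_filter]
        exact List.countP_mono_left hmono
      simp only [List.filter_cons]
      rcases List.mem_cons.1 hd with rfl | hd'
      · rw [hp, hq]; simpa using Nat.lt_succ_of_le hle
      · have := ih hmono hd'
        by_cases hx : p x = true
        · rw [hx, h x List.mem_cons_self hx]; simpa using this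
        · rw [Bool.not_eq_true] at hx
          rw [hx]
          cases hqx : q x <;> simp [this]
          omega

theorem isKey_iff (l : List (String × List String)) (d : String) :
    isKey l d = true ↔ d ∈ l.map Prod.fst := by
  unfold isKey
  simp only [List.any_eq_true, beq_iff_eq, List.mem_map]

theorem mem_contains (ip : PySem.Set String) (a : String) :
    PySem.Set.contains ip a = true ↔ a ∈ ip := by simp [PySem.Set.contains]

theorem scanB_eq_some (l : List (String × List String)) (lv : PySem.Dict String Int)
    (ip : PySem.Set String) : ∀ rest d rest', scanB l lv ip rest = some (d, rest') →
    isKey l d = true ∧ lv.contains d = false ∧ PySem.Set.contains ip d = false := by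
  intro rest
  induction rest with
  | nil => intro d rest' h; simp [scanB] at h
  | cons x xs ih =>
      intro d rest' h
      by_cases hx : (isKey l x && !(lv.contains x) && !(PySem.Set.contains ip x)) = true
      · simp only [scanB, hx, if_true] at h
        cases h
        simp only [Bool.and_eq_true, Bool.not_eq_true'] at hx
        exact ⟨hx.1.1, hx.1.2, hx.2⟩
      · simp only [scanB, hx, if_false] at h
        exact ih d rest' h

theorem pendingB_push (l : List (String × List String)) (lv : PySem.Dict String Int)
    (ip : PySem.Set String) (d : String) (hk : isKey l d = true)
    (hlv : lv.contains d = false) (hip : PySem.Set.contains ip d = false) :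
    pendingB l lv (PySem.Set.add ip d) < pendingB l lv ip := by
  unfold pendingB
  refine filterLenLt _ _ _ ?_ d ?_ ?_ ?_
  · intro a _ ha
    simp only [Bool.and_eq_true, Bool.not_eq_true'] at ha ⊢
    refine ⟨ha.1, ?_⟩
    cases hc : PySem.Set.contains ip a with
    | false => rfl
    | true =>
        exfalso
        have hmem : a ∈ PySem.Set.add ip d :=
          (PySem.Set.mem_add ip d a).mpr (Or.inl ((mem_contains ip a).mp hc))
        rw [(mem_contains _ a).mpr hmem] at ha
        exact absurd ha.2 (by simp)
  · rw [PySem.List.mem_dedup]; exact (isKey_iff l d).mp hk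
  · have h1 : PySem.Set.contains (PySem.Set.add ip d) d = true :=
      (mem_contains _ d).mpr ((PySem.Set.mem_add ip d d).mpr (Or.inr rfl))
    simp [h1]
  · simp only [Bool.and_eq_true, Bool.not_eq_true']
    exact ⟨hlv, hip⟩

theorem pendingB_pop (l : List (String × List String)) (lv : PySem.Dict String Int)
    (ip : PySem.Set String) (node : String) (x : Int) :
    pendingB l (lv.insert node x) (PySem.Set.discard ip node) ≤ pendingB l lv ip := by
  unfold pendingB
  rw [← List.countP_eq_length_filter, ← List.countP_eq_length_filter]
  apply List.countP_mono_left
  intro k _ hk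
  simp only [Bool.and_eq_true, Bool.not_eq_true'] at hk ⊢
  have hins := hk.1
  rw [PySem.Dict.contains_insert] at hins
  have hkne : (k == node) = false := by
    cases h : (k == node) with
    | false => rfl
    | true => rw [h] at hins; cases hins
  have hlvk : lv.contains k = false := by
    rw [hkne] at hins; simpa using hins
  refine ⟨hlvk, ?_⟩
  cases hc : PySem.Set.contains ip k with
  | false => rfl
  | true =>
      exfalso
      have hmem : k ∈ ip := (mem_contains ip k).mp hc
      have hne : k ≠ node := by simpa using hkne
      have : PySem.Set.contains (PySem.Set.discard ip node) k = true :=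
        (mem_contains _ k).mpr ((PySem.Set.mem_discard ip node k).mpr ⟨hmem, hne⟩)
      rw [this] at hk
      exact absurd hk.2 (by simp)

theorem finalizeB_insert (l : List (String × List String)) (node : String)
    (lv lv' : PySem.Dict String Int) (h : finalizeB l node lv = some lv') :
    ∃ x, lv' = lv.insert node x := by
  unfold finalizeB at h
  split at h
  · exact ⟨0, by cases h; rfl⟩
  · split at h
    · cases h
    · next m _ => exact ⟨m + 1, by cases h; rfl⟩

-- the `while stack:` loop; state = (stack, levels, in_progress), top of stack first
def loopB (l : List (String × List String)) :
    List (String × List String) → PySem.Dict String Int → PySem.Set String →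
    Option (PySem.Dict String Int × PySem.Set String)
  | [], lv, ip => some (lv, ip)
  | (node, rest) :: frames, lv, ip =>
      match hs : scanB l lv ip rest with
      | some (d, rest') =>
          loopB l ((d, depsOf l d) :: (node, rest') :: frames) lv (PySem.Set.add ip d)
      | none =>
          match hf : finalizeB l node lv with
          | none => none
          | some lv' => loopB l frames lv' (PySem.Set.discard ip node)
termination_by stack lv ip => (pendingB l lv ip, stack.length)
decreasing_by
  · have h := scanB_eq_some l lv ip rest _ _ hs
    exact Prod.Lex.left _ _ (pendingB_push l lv ip _ h.1 h.2.1 h.2.2)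
  · obtain ⟨x, hx⟩ := finalizeB_insert l node lv lv' hf
    subst hx
    rcases lt_or_eq_of_le (pendingB_pop l lv ip node x) with h | h
    · exact Prod.Lex.left _ _ h
    · rw [h]; exact Prod.Lex.right _ (by simp)

-- `for root in artifact_deps:` with its `if root in levels: continue`
def runRootsB (l : List (String × List String)) :
    List String → PySem.Dict String Int → PySem.Set String →
    Option (PySem.Dict String Int × PySem.Set String)
  | [], lv, ip => some (lv, ip)
  | r :: rs, lv, ip =>
      if lv.contains r then runRootsB l rs lv ip
      else
        match loopB l [(r, depsOf l r)] lv (PySem.Set.add ip r) with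
        | none => none
        | some (lv', ip') => runRootsB l rs lv' ip'

def calculate_build_levels_alt (artifact_deps : List (String × List String)) : List (String × Int) :=
  match runRootsB artifact_deps (artifact_deps.map Prod.fst) PySem.Dict.empty PySem.Set.empty with
  | some (lv, _) => lv.items
  | none => []

-- ===== PRECONDITION & SPEC =====
-- Pre_ excludes exactly the inputs on which the Python A raises ValueError (max() of an empty
-- sequence): some key whose dependency list is non-empty but contains no key of the dict.
-- B raises the same ValueError there.
def Pre_calculate_build_levels (artifact_deps : List (String × List String)) : Prop :=
  ∀ p ∈ artifact_deps, depsOf artifact_deps p.1 = [] ∨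
    ∃ d ∈ depsOf artifact_deps p.1, d ∈ artifact_deps.map Prod.fst

instance (artifact_deps : List (String × List String)) :
    Decidable (Pre_calculate_build_levels artifact_deps) := by
  unfold Pre_calculate_build_levels; infer_instance

def pvWitness_calculate_build_levels : (List (String × List String)) :=
  [("a", []), ("b", ["a"])]

def Spec_calculate_build_levels (artifact_deps : List (String × List String)) (out : List (String × Int)) : Prop := out = calculate_build_levels_alt artifact_deps
instance (artifact_deps : List (String × List String)) (out : List (String × Int)) : Decidable (Spec_calculate_build_levels artifact_deps out) := by unfold Spec_calculate_build_levels; infer_instance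

-- ===== CLAIM (what is proved, stated in full; the proofs are below) =====
def Claim_equal_calculate_build_levels : Prop := ∀ (artifact_deps : List (String × List String)), Dom_calculate_build_levels artifact_deps → Pre_calculate_build_levels artifact_deps → Spec_calculate_build_levels artifact_deps (calculate_build_levels artifact_deps)

-- ===== LEMMAS AND PROOFS =====

-- characterization of a successful getLevelA call: levels entries persist, visited grows,
-- newly finished = newly visited, the returned value is the recorded level
def PgA (l : List (String × List String)) (f : Nat) : Prop :=
  ∀ a lv vis v lv1 vis1, getLevelA l f a lv vis = some (v, lv1, vis1) →
    (∀ k, lv.contains k = true → k ∈ vis) →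
    ((∀ k, lv.contains k = true → lv1.get? k = lv.get? k) ∧
     (∀ k, k ∈ vis → k ∈ vis1) ∧
     (∀ k, lv1.contains k = true ↔ (lv.contains k = true ∨ (k ∈ vis1 ∧ k ∉ vis))) ∧
     a ∈ vis1 ∧
     (a ∉ vis → lv1.get? a = some v) ∧
     (a ∈ vis → lv1 = lv ∧ vis1 = vis ∧ v = lv.getD a 0))

def PdA (l : List (String × List String)) (f : Nat) : Prop :=
  ∀ ds lv vis vals lv1 vis1, depLevelsA l f ds lv vis = some (vals, lv1, vis1) →
    (∀ k, lv.contains k = true → k ∈ vis) →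
    ((∀ k, lv.contains k = true → lv1.get? k = lv.get? k) ∧
     (∀ k, k ∈ vis → k ∈ vis1) ∧
     (∀ k, lv1.contains k = true ↔ (lv.contains k = true ∨ (k ∈ vis1 ∧ k ∉ vis))) ∧
     vals.length = (ds.filter (fun d => isKey l d)).length)

theorem conj3_trans {lv lv' lv1 : PySem.Dict String Int} {vis vis' vis1 : PySem.Set String}
    (h12 : ∀ k, lv'.contains k = true ↔ (lv.contains k = true ∨ (k ∈ vis' ∧ k ∉ vis)))
    (h23 : ∀ k, lv1.contains k = true ↔ (lv'.contains k = true ∨ (k ∈ vis1 ∧ k ∉ vis')))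
    (m12 : ∀ k : String, k ∈ vis → k ∈ vis') (m23 : ∀ k : String, k ∈ vis' → k ∈ vis1) :
    ∀ k, lv1.contains k = true ↔ (lv.contains k = true ∨ (k ∈ vis1 ∧ k ∉ vis)) := by
  intro k
  constructor
  · intro h
    rcases (h23 k).mp h with h' | ⟨h1, h2⟩
    · rcases (h12 k).mp h' with h'' | ⟨ha, hb⟩
      · exact Or.inl h''
      · exact Or.inr ⟨m23 k ha, hb⟩
    · exact Or.inr ⟨h1, fun hk => h2 (m12 k hk)⟩
  · intro h
    rcases h with h | ⟨h1, h2⟩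
    · exact (h23 k).mpr (Or.inl ((h12 k).mpr (Or.inl h)))
    · by_cases hk : k ∈ vis'
      · exact (h23 k).mpr (Or.inl ((h12 k).mpr (Or.inr ⟨hk, h2⟩)))
      · exact (h23 k).mpr (Or.inr ⟨h1, hk⟩)

theorem PdA_of (l : List (String × List String)) (f : Nat) (IH : PgA l f) : PdA l f := by
  intro ds
  induction ds with
  | nil =>
      intro lv vis vals lv1 vis1 h hsub
      simp only [depLevelsA, Option.some.injEq, Prod.mk.injEq] at h
      obtain ⟨rfl, rfl, rfl⟩ := h
      refine ⟨fun k _ => rfl, fun k hk => hk, fun k => ?_, rfl⟩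
      simp
  | cons d ds ih =>
      intro lv vis vals lv1 vis1 h hsub
      by_cases hkey : isKey l d = true
      · simp only [depLevelsA, hkey, if_true] at h
        cases hg : getLevelA l f d lv vis with
        | none => rw [hg] at h; cases h
        | some r =>
            obtain ⟨v, lv', vis'⟩ := r
            rw [hg] at h
            dsimp only at h
            cases hd2 : depLevelsA l f ds lv' vis' with
            | none => rw [hd2] at h; cases h
            | some r2 =>
                obtain ⟨vs, lv2, vis2⟩ := r2
                rw [hd2] at h
                dsimp only at h
                simp only [Option.some.injEq, Prod.mk.injEq] at h
                obtain ⟨rfl, rfl, rfl⟩ := h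
                obtain ⟨g1, g2, g3, g4, g5, g6⟩ := IH d lv vis v lv' vis' hg hsub
                have hsub' : ∀ k, lv'.contains k = true → k ∈ vis' := by
                  intro k hk
                  rcases (g3 k).mp hk with hh | ⟨hh, _⟩
                  · exact g2 k (hsub k hh)
                  · exact hh
                obtain ⟨d1, d2, d3, d4⟩ := ih lv' vis' vs _ _ hd2 hsub'
                refine ⟨?_, fun k hk => d2 k (g2 k hk), conj3_trans g3 d3 g2 d2, ?_⟩
                · intro k hk
                  have hk' : lv'.contains k = true := (g3 k).mpr (Or.inl hk)
                  rw [d1 k hk', g1 k hk]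
                · simp [List.filter_cons, hkey, d4]
      · have hkey' : isKey l d = false := by
          cases hb : isKey l d with
          | false => rfl
          | true => exact absurd hb hkey
        simp only [depLevelsA, hkey', Bool.false_eq_true, if_false] at h
        obtain ⟨d1, d2, d3, d4⟩ := ih lv vis vals lv1 vis1 h hsub
        refine ⟨d1, d2, d3, ?_⟩
        simp [List.filter_cons, hkey', d4]

theorem contains_mem_vis {lv : PySem.Dict String Int} {vis : PySem.Set String} {a : String}
    (hsub : ∀ k, lv.contains k = true → k ∈ vis) (ha : a ∉ vis) : lv.contains a = false := by
  cases hc : lv.contains a with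
  | false => rfl
  | true => exact absurd (hsub a hc) ha

theorem PgA_all (l : List (String × List String)) : ∀ f, PgA l f := by
  intro f
  induction f with
  | zero =>
      intro a lv vis v lv1 vis1 h
      simp [getLevelA] at h
  | succ f ihf =>
      intro a lv vis v lv1 vis1 h hsub
      by_cases hvis : PySem.Set.contains vis a = true
      · simp only [getLevelA, hvis, if_true, Option.some.injEq, Prod.mk.injEq] at h
        obtain ⟨rfl, rfl, rfl⟩ := h
        have hav : a ∈ vis := (mem_contains vis a).mp hvis
        refine ⟨fun k _ => rfl, fun k hk => hk, fun k => by simp, hav,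
          fun hna => absurd hav hna, fun _ => ⟨rfl, rfl, rfl⟩⟩
      · have hvis' : PySem.Set.contains vis a = false := by
          cases hb : PySem.Set.contains vis a with
          | false => rfl
          | true => exact absurd hb hvis
        have hna : a ∉ vis := fun hm => by
          rw [(mem_contains vis a).mpr hm] at hvis'; cases hvis'
        have hlva : lv.contains a = false := contains_mem_vis hsub hna
        by_cases hdeps : (depsOf l a).isEmpty = true
        · simp only [getLevelA, hvis', Bool.false_eq_true, if_false, hdeps, if_true,
            Option.some.injEq, Prod.mk.injEq] at h
          obtain ⟨rfl, rfl, rfl⟩ := h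
          refine ⟨?_, fun k hk => (PySem.Set.mem_add vis a k).mpr (Or.inl hk), ?_, ?_, ?_, ?_⟩
          · intro k hk
            have hkne : k ≠ a := fun he => by rw [he, hlva] at hk; cases hk
            rw [PySem.Dict.get?_insert]
            simp [hkne]
          · intro k
            rw [PySem.Dict.contains_insert]
            by_cases hka : k = a
            · subst hka
              simp only [BEq.rfl, Bool.true_or, true_iff]
              exact Or.inr ⟨(PySem.Set.mem_add vis k k).mpr (Or.inr rfl), hna⟩
            · have : (k == a) = false := beq_eq_false_iff_ne.mpr hka
              rw [this]
              simp only [Bool.false_or]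
              constructor
              · exact fun hk => Or.inl hk
              · rintro (hk | ⟨hk1, hk2⟩)
                · exact hk
                · rcases (PySem.Set.mem_add vis a k).mp hk1 with hk3 | hk3
                  · exact absurd hk3 hk2
                  · exact absurd hk3 hka
          · exact (PySem.Set.mem_add vis a a).mpr (Or.inr rfl)
          · intro _
            rw [PySem.Dict.get?_insert]
            simp
          · intro hmem; exact absurd hmem hna
        · have hdeps' : (depsOf l a).isEmpty = false := by
            cases hb : (depsOf l a).isEmpty with
            | false => rfl
            | true => exact absurd hb hdeps
          simp only [getLevelA, hvis', Bool.false_eq_true, if_false, hdeps', if_true] at h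
          cases hd : depLevelsA l f (depsOf l a) lv (PySem.Set.add vis a) with
          | none => rw [hd] at h; cases h
          | some r =>
              obtain ⟨vals, lv1', vis1'⟩ := r
              rw [hd] at h
              dsimp only at h
              cases hm : PySem.List.max? vals (fun x => x) with
              | none => rw [hm] at h; cases h
              | some m =>
                  rw [hm] at h
                  dsimp only at h
                  simp only [Option.some.injEq, Prod.mk.injEq] at h
                  obtain ⟨rfl, rfl, rfl⟩ := h
                  have hsub' : ∀ k, lv.contains k = true → k ∈ PySem.Set.add vis a :=
                    fun k hk => (PySem.Set.mem_add vis a k).mpr (Or.inl (hsub k hk))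
                  obtain ⟨d1, d2, d3, _⟩ := PdA_of l f ihf (depsOf l a) lv
                    (PySem.Set.add vis a) vals lv1' vis1' hd hsub'
                  have hav1 : a ∈ vis1' := d2 a ((PySem.Set.mem_add vis a a).mpr (Or.inr rfl))
                  refine ⟨?_, ?_, ?_, hav1, ?_, ?_⟩
                  · intro k hk
                    have hkne : k ≠ a := fun he => by rw [he, hlva] at hk; cases hk
                    rw [PySem.Dict.get?_insert]
                    simp only [hkne, if_false]
                    exact d1 k hk
                  · exact fun k hk => d2 k ((PySem.Set.mem_add vis a k).mpr (Or.inl hk))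
                  · intro k
                    rw [PySem.Dict.contains_insert]
                    by_cases hka : k = a
                    · subst hka
                      simp only [BEq.rfl, Bool.true_or, true_iff]
                      exact Or.inr ⟨hav1, hna⟩
                    · have hbe : (k == a) = false := beq_eq_false_iff_ne.mpr hka
                      rw [hbe]
                      simp only [Bool.false_or]
                      rw [d3 k]
                      constructor
                      · rintro (hk | ⟨hk1, hk2⟩)
                        · exact Or.inl hk
                        · refine Or.inr ⟨hk1, fun hk3 => hk2 ?_⟩
                          exact (PySem.Set.mem_add vis a k).mpr (Or.inl hk3)
                      · rintro (hk | ⟨hk1, hk2⟩)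
                        · exact Or.inl hk
                        · refine Or.inr ⟨hk1, fun hk3 => ?_⟩
                          rcases (PySem.Set.mem_add vis a k).mp hk3 with hk4 | hk4
                          · exact hk2 hk4
                          · exact hka hk4
                  · intro _
                    rw [PySem.Dict.get?_insert]
                    simp
                  · intro hmem; exact absurd hmem hna

-- fuel sufficiency: with more fuel than the number of unvisited keys, getLevelA succeeds
def UA (l : List (String × List String)) (vis : PySem.Set String) : Nat :=
  ((PySem.List.dedup (l.map Prod.fst)).filter (fun k => !(PySem.Set.contains vis k))).length

def SgA (l : List (String × List String)) (f : Nat) : Prop :=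
  Pre_calculate_build_levels l →
  ∀ a lv vis, a ∈ l.map Prod.fst → UA l vis < f →
    (∀ k, lv.contains k = true → k ∈ vis) →
    ∃ r, getLevelA l f a lv vis = some r

def SdA (l : List (String × List String)) (f : Nat) : Prop :=
  Pre_calculate_build_levels l →
  ∀ ds lv vis, UA l vis < f →
    (∀ k, lv.contains k = true → k ∈ vis) →
    ∃ r, depLevelsA l f ds lv vis = some r

theorem UA_mono (l : List (String × List String)) (vis vis' : PySem.Set String)
    (h : ∀ k : String, k ∈ vis → k ∈ vis') : UA l vis' ≤ UA l vis := by
  unfold UA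
  rw [← List.countP_eq_length_filter, ← List.countP_eq_length_filter]
  apply List.countP_mono_left
  intro k _ hk
  simp only [Bool.not_eq_true'] at hk ⊢
  cases hc : PySem.Set.contains vis k with
  | false => rfl
  | true =>
      exfalso
      have : PySem.Set.contains vis' k = true :=
        (mem_contains vis' k).mpr (h k ((mem_contains vis k).mp hc))
      rw [this] at hk; cases hk

theorem UA_add_lt (l : List (String × List String)) (vis : PySem.Set String) (a : String)
    (hmem : a ∈ l.map Prod.fst) (hvis : PySem.Set.contains vis a = false) :
    UA l (PySem.Set.add vis a) < UA l vis := by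
  unfold UA
  refine filterLenLt _ _ _ ?_ a ?_ ?_ ?_
  · intro k _ hk
    simp only [Bool.not_eq_true'] at hk ⊢
    cases hc : PySem.Set.contains vis k with
    | false => rfl
    | true =>
        exfalso
        have : PySem.Set.contains (PySem.Set.add vis a) k = true :=
          (mem_contains _ k).mpr ((PySem.Set.mem_add vis a k).mpr
            (Or.inl ((mem_contains vis k).mp hc)))
        rw [this] at hk; cases hk
  · rw [PySem.List.mem_dedup]; exact hmem
  · have : PySem.Set.contains (PySem.Set.add vis a) a = true :=
      (mem_contains _ a).mpr ((PySem.Set.mem_add vis a a).mpr (Or.inr rfl))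
    simp [this]
  · simp only [Bool.not_eq_true', hvis]

theorem SdA_of (l : List (String × List String)) (f : Nat) (IH : SgA l f) : SdA l f := by
  intro hpre ds
  induction ds with
  | nil =>
      intro lv vis _ _
      exact ⟨([], lv, vis), by simp [depLevelsA]⟩
  | cons d ds ih =>
      intro lv vis hU hsub
      by_cases hkey : isKey l d = true
      · obtain ⟨⟨v, lv', vis'⟩, hg⟩ :=
          IH hpre d lv vis ((isKey_iff l d).mp hkey) hU hsub
        obtain ⟨g1, g2, g3, g4, g5, g6⟩ := PgA_all l f d lv vis v lv' vis' hg hsub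
        have hsub' : ∀ k, lv'.contains k = true → k ∈ vis' := by
          intro k hk
          rcases (g3 k).mp hk with hh | ⟨hh, _⟩
          · exact g2 k (hsub k hh)
          · exact hh
        have hU' : UA l vis' < f := lt_of_le_of_lt (UA_mono l vis vis' g2) hU
        obtain ⟨⟨vs, lv2, vis2⟩, hd2⟩ := ih lv' vis' hU' hsub'
        refine ⟨(v :: vs, lv2, vis2), ?_⟩
        simp only [depLevelsA, hkey, if_true]
        rw [hg]
        dsimp only
        rw [hd2]
      · have hkey' : isKey l d = false := by
          cases hb : isKey l d with
          | false => rfl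
          | true => exact absurd hb hkey
        obtain ⟨r, hr⟩ := ih lv vis hU hsub
        refine ⟨r, ?_⟩
        simp only [depLevelsA, hkey', Bool.false_eq_true, if_false]
        exact hr

theorem SgA_all (l : List (String × List String)) : ∀ f, SgA l f := by
  intro f
  induction f with
  | zero => intro _ a lv vis _ hU _; omega
  | succ f ihf =>
      intro hpre a lv vis hmem hU hsub
      by_cases hvis : PySem.Set.contains vis a = true
      · have hmemv : a ∈ vis := (mem_contains vis a).mp hvis
        exact ⟨(lv.getD a 0, lv, vis), by simp [getLevelA, hvis, hmemv]⟩
      · have hvis' : PySem.Set.contains vis a = false := by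
          cases hb : PySem.Set.contains vis a with
          | false => rfl
          | true => exact absurd hb hvis
        have hnotv : a ∉ vis := fun hm => by
          rw [(mem_contains vis a).mpr hm] at hvis'; cases hvis'
        by_cases hdeps : (depsOf l a).isEmpty = true
        · exact ⟨(0, lv.insert a 0, PySem.Set.add vis a),
            by simp [getLevelA, hvis', List.isEmpty_iff.mp hdeps, hnotv]⟩
        · have hdeps' : (depsOf l a).isEmpty = false := by
            cases hb : (depsOf l a).isEmpty with
            | false => rfl
            | true => exact absurd hb hdeps
          have hU' : UA l (PySem.Set.add vis a) < f := by
            have h1 := UA_add_lt l vis a hmem hvis'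
            omega
          have hsub' : ∀ k, lv.contains k = true → k ∈ PySem.Set.add vis a :=
            fun k hk => (PySem.Set.mem_add vis a k).mpr (Or.inl (hsub k hk))
          obtain ⟨⟨vals, lv1, vis1⟩, hd⟩ :=
            SdA_of l f ihf hpre (depsOf l a) lv (PySem.Set.add vis a) hU' hsub'
          have hvals : vals ≠ [] := by
            obtain ⟨p, hp, hpa⟩ := List.mem_map.mp hmem
            rcases hpre p hp with hemp | ⟨d, hd1, hd2⟩
            · rw [hpa] at hemp
              rw [hemp] at hdeps'
              simp at hdeps'
            · rw [hpa] at hd1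
              have hdf : d ∈ (depsOf l a).filter (fun d => isKey l d) :=
                List.mem_filter.mpr ⟨hd1, (isKey_iff l d).mpr hd2⟩
              obtain ⟨_, _, _, hlen⟩ := PdA_of l f (PgA_all l f) (depsOf l a) lv
                (PySem.Set.add vis a) vals lv1 vis1 hd hsub'
              intro hnil
              rw [hnil] at hlen
              have : (depsOf l a).filter (fun d => isKey l d) ≠ [] :=
                List.ne_nil_of_mem hdf
              simp only [List.length_nil] at hlen
              exact this (List.eq_nil_of_length_eq_zero hlen.symm)
          cases hvc : vals with
          | nil => exact absurd hvc hvals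
          | cons x t =>
            cases hm : PySem.List.max? vals (fun x => x) with
            | none =>
                rw [hvc, PySem.List.max?_id_cons] at hm
                cases hm
            | some m =>
              refine ⟨(m + 1, lv1.insert a (m + 1), vis1), ?_⟩
              simp only [getLevelA, hvis', Bool.false_eq_true, if_false, hdeps']
              rw [hd]
              dsimp only
              rw [hm]

-- the simulation: B's machine executes A's recursion
def SimG (l : List (String × List String)) (f : Nat) : Prop :=
  ∀ a lv vis v lv1 vis1 ip frames, getLevelA l f a lv vis = some (v, lv1, vis1) →
    a ∉ vis →
    (∀ k, k ∈ vis ↔ (lv.contains k = true ∨ k ∈ ip)) →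
    (∀ k, k ∈ ip → lv.contains k = false) →
    loopB l ((a, depsOf l a) :: frames) lv (PySem.Set.add ip a) = loopB l frames lv1 ip

def SimD (l : List (String × List String)) (f : Nat) : Prop :=
  ∀ rest node frames lv vis ip vals lv1 vis1,
    depLevelsA l f rest lv vis = some (vals, lv1, vis1) →
    (∀ k, k ∈ vis ↔ (lv.contains k = true ∨ k ∈ ip)) →
    (∀ k, k ∈ ip → lv.contains k = false) →
    (loopB l ((node, rest) :: frames) lv ip = loopB l ((node, []) :: frames) lv1 ip ∧
     vals = (rest.filter (fun d => isKey l d)).map (fun d => lv1.getD d 0))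

theorem scanB_cons_false (l : List (String × List String)) (lv : PySem.Dict String Int)
    (ip : PySem.Set String) (d : String) (ds : List String)
    (h : (isKey l d && !(lv.contains d) && !(PySem.Set.contains ip d)) = false) :
    scanB l lv ip (d :: ds) = scanB l lv ip ds := by
  simp only [scanB, h, Bool.false_eq_true, if_false]

theorem scanB_cons_true (l : List (String × List String)) (lv : PySem.Dict String Int)
    (ip : PySem.Set String) (d : String) (ds : List String)
    (h : (isKey l d && !(lv.contains d) && !(PySem.Set.contains ip d)) = true) :
    scanB l lv ip (d :: ds) = some (d, ds) := by
  simp only [scanB, h, if_true]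

theorem loopB_nil (l : List (String × List String)) (lv : PySem.Dict String Int)
    (ip : PySem.Set String) : loopB l [] lv ip = some (lv, ip) := by
  simp [loopB]

theorem loopB_push (l : List (String × List String)) (node : String)
    (rest : List String) (frames : List (String × List String))
    (lv : PySem.Dict String Int) (ip : PySem.Set String) (d : String) (rest' : List String)
    (h : scanB l lv ip rest = some (d, rest')) :
    loopB l ((node, rest) :: frames) lv ip =
      loopB l ((d, depsOf l d) :: (node, rest') :: frames) lv (PySem.Set.add ip d) := by
  rw [loopB]
  split
  · next d2 rest2 heq => rw [h] at heq; cases heq; rfl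
  · next heq => rw [h] at heq; cases heq

theorem loopB_skip (l : List (String × List String)) (node : String) (d : String)
    (ds : List String) (frames : List (String × List String))
    (lv : PySem.Dict String Int) (ip : PySem.Set String)
    (h : (isKey l d && !(lv.contains d) && !(PySem.Set.contains ip d)) = false) :
    loopB l ((node, d :: ds) :: frames) lv ip = loopB l ((node, ds) :: frames) lv ip := by
  rw [loopB, loopB]
  rw [scanB_cons_false l lv ip d ds h]

theorem loopB_fin (l : List (String × List String)) (node : String)
    (frames : List (String × List String)) (lv lv' : PySem.Dict String Int)
    (ip : PySem.Set String) (hf : finalizeB l node lv = some lv') :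
    loopB l ((node, ([] : List String)) :: frames) lv ip =
      loopB l frames lv' (PySem.Set.discard ip node) := by
  rw [loopB]
  split
  · next d2 rest2 heq => simp [scanB] at heq
  · next =>
      split
      · next heq => rw [hf] at heq; cases heq
      · next lv2 heq => rw [hf] at heq; cases heq; rfl

theorem discard_add (ip : PySem.Set String) (a : String) (h : a ∉ ip) :
    PySem.Set.discard (PySem.Set.add ip a) a = ip := by
  simp only [PySem.Set.discard, PySem.Set.add, PySem.Set.contains]
  rw [if_neg (by simpa using h)]
  rw [List.filter_append]
  have h1 : ip.filter (fun y => !(y == a)) = ip := by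
    apply List.filter_eq_self.mpr
    intro y hy
    simp only [Bool.not_eq_true']
    exact beq_eq_false_iff_ne.mpr (fun he => h (he ▸ hy))
  have h2 : [a].filter (fun y => !(y == a)) = [] := by simp
  rw [h1, h2, List.append_nil]

theorem SimD_of (l : List (String × List String)) (f : Nat) (IH : SimG l f) : SimD l f := by
  intro rest node frames
  induction rest with
  | nil =>
      intro lv vis ip vals lv1 vis1 h _ _
      simp only [depLevelsA, Option.some.injEq, Prod.mk.injEq] at h
      obtain ⟨rfl, rfl, rfl⟩ := h
      exact ⟨rfl, rfl⟩
  | cons d ds ih =>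
      intro lv vis ip vals lv1 vis1 h hvis hdis
      have hsub : ∀ k, lv.contains k = true → k ∈ vis :=
        fun k hk => (hvis k).mpr (Or.inl hk)
      by_cases hkey : isKey l d = true
      · simp only [depLevelsA, hkey, if_true] at h
        cases hg : getLevelA l f d lv vis with
        | none => rw [hg] at h; cases h
        | some r =>
            obtain ⟨v, lv', vis'⟩ := r
            rw [hg] at h
            dsimp only at h
            cases hd2 : depLevelsA l f ds lv' vis' with
            | none => rw [hd2] at h; cases h
            | some r2 =>
                obtain ⟨vs, lv2, vis2⟩ := r2
                rw [hd2] at h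
                dsimp only at h
                simp only [Option.some.injEq, Prod.mk.injEq] at h
                obtain ⟨rfl, rfl, rfl⟩ := h
                obtain ⟨g1, g2, g3, g4, g5, g6⟩ := PgA_all l f d lv vis v lv' vis' hg hsub
                by_cases hdv : d ∈ vis
                · obtain ⟨he1, he2, he3⟩ := g6 hdv
                  subst he1; subst he2; subst he3
                  obtain ⟨d1', d2', d3', _⟩ := PdA_of l f (PgA_all l f) ds _ _ vs lv2 vis2 hd2 hsub
                  have hpred : (isKey l d && !(lv'.contains d) && !(PySem.Set.contains ip d)) = false := by
                    rcases (hvis d).mp hdv with hcd | hid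
                    · simp [hcd]
                    · have h1 : PySem.Set.contains ip d = true := (mem_contains ip d).mpr hid
                      rw [h1]
                      simp
                  obtain ⟨c1', c2'⟩ := ih _ _ ip vs lv2 vis2 hd2 hvis hdis
                  refine ⟨?_, ?_⟩
                  · rw [loopB_skip l node d ds frames _ ip hpred]
                    exact c1'
                  · simp only [List.filter_cons, hkey, if_true, List.map_cons]
                    refine congrArg₂ _ ?_ c2'
                    by_cases hcd : lv'.contains d = true
                    · rw [PySem.Dict.getD_eq_get?_getD lv' d 0, PySem.Dict.getD_eq_get?_getD lv2 d 0, d1' d hcd]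
                    · have hcd' : lv'.contains d = false := by
                        cases hb : lv'.contains d with
                        | false => rfl
                        | true => exact absurd hb hcd
                      have hc2 : lv2.contains d = false := by
                        cases hb : lv2.contains d with
                        | true =>
                            rcases (d3' d).mp hb with hh | ⟨_, hh⟩
                            · rw [hh] at hcd'; cases hcd'
                            · exact absurd hdv hh
                        | false => rfl
                      rw [PySem.Dict.getD_of_not_contains lv' 0 hcd',
                        PySem.Dict.getD_of_not_contains lv2 0 hc2]
                · have hcd : lv.contains d = false := contains_mem_vis hsub hdv
                  have hid : d ∉ ip := fun hm => hdv ((hvis d).mpr (Or.inr hm))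
                  have hid' : PySem.Set.contains ip d = false := by
                    cases hb : PySem.Set.contains ip d with
                    | false => rfl
                    | true => exact absurd ((mem_contains ip d).mp hb) hid
                  have hpred : (isKey l d && !(lv.contains d) && !(PySem.Set.contains ip d)) = true := by
                    simp only [hkey, hcd, hid', Bool.not_false, Bool.and_true, Bool.and_self]
                  have hscan : scanB l lv ip (d :: ds) = some (d, ds) :=
                    scanB_cons_true l lv ip d ds hpred
                  -- re-establish the invariants at (lv', vis')
                  have hvis' : ∀ k, k ∈ vis' ↔ (lv'.contains k = true ∨ k ∈ ip) := by
                    intro k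
                    constructor
                    · intro hk
                      by_cases hkv : k ∈ vis
                      · rcases (hvis k).mp hkv with hh | hh
                        · exact Or.inl ((g3 k).mpr (Or.inl hh))
                        · exact Or.inr hh
                      · exact Or.inl ((g3 k).mpr (Or.inr ⟨hk, hkv⟩))
                    · intro hk
                      rcases hk with hh | hh
                      · rcases (g3 k).mp hh with hh2 | ⟨hh2, _⟩
                        · exact g2 k ((hvis k).mpr (Or.inl hh2))
                        · exact hh2
                      · exact g2 k ((hvis k).mpr (Or.inr hh))
                  have hdis' : ∀ k, k ∈ ip → lv'.contains k = false := by
                    intro k hk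
                    cases hb : lv'.contains k with
                    | false => rfl
                    | true =>
                        exfalso
                        rcases (g3 k).mp hb with hh | ⟨_, hh⟩
                        · rw [hdis k hk] at hh; cases hh
                        · exact hh ((hvis k).mpr (Or.inr hk))
                  obtain ⟨c1', c2'⟩ := ih lv' vis' ip vs lv2 vis2 hd2 hvis' hdis'
                  obtain ⟨d1', d2', d3', _⟩ :=
                    PdA_of l f (PgA_all l f) ds lv' vis' vs lv2 vis2 hd2
                      (fun k hk => (hvis' k).mpr (Or.inl hk))
                  refine ⟨?_, ?_⟩
                  · rw [loopB_push l node (d :: ds) frames lv ip d ds hscan]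
                    rw [IH d lv vis v lv' vis' ip ((node, ds) :: frames) hg hdv hvis hdis]
                    exact c1'
                  · simp only [List.filter_cons, hkey, if_true, List.map_cons]
                    refine congrArg₂ _ ?_ c2'
                    have hget : lv'.get? d = some v := g5 hdv
                    have hcd2 : lv'.contains d = true := by
                      rw [PySem.Dict.contains_eq_isSome_get?, hget]; rfl
                    have hpers := d1' d hcd2
                    rw [PySem.Dict.getD_eq_get?_getD lv2 d 0, hpers, hget]
                    rfl
      · have hkey' : isKey l d = false := by
          cases hb : isKey l d with
          | false => rfl
          | true => exact absurd hb hkey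
        simp only [depLevelsA, hkey', Bool.false_eq_true, if_false] at h
        obtain ⟨c1', c2'⟩ := ih lv vis ip vals lv1 vis1 h hvis hdis
        refine ⟨?_, ?_⟩
        · rw [loopB_skip l node d ds frames lv ip (by simp [hkey'])]
          exact c1'
        · simp only [List.filter_cons, hkey', Bool.false_eq_true, if_false]
          exact c2'

theorem SimG_all (l : List (String × List String)) : ∀ f, SimG l f := by
  intro f
  induction f with
  | zero =>
      intro a lv vis v lv1 vis1 ip frames h
      simp [getLevelA] at h
  | succ f ihf =>
      intro a lv vis v lv1 vis1 ip frames h hna hvis hdis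
      have hvis' : PySem.Set.contains vis a = false := by
        cases hb : PySem.Set.contains vis a with
        | false => rfl
        | true => exact absurd ((mem_contains vis a).mp hb) hna
      have hsub : ∀ k, lv.contains k = true → k ∈ vis :=
        fun k hk => (hvis k).mpr (Or.inl hk)
      have hlva : lv.contains a = false := contains_mem_vis hsub hna
      have hnip : a ∉ ip := fun hm => hna ((hvis a).mpr (Or.inr hm))
      by_cases hdeps : (depsOf l a).isEmpty = true
      · simp only [getLevelA, hvis', Bool.false_eq_true, if_false, hdeps, if_true,
          Option.some.injEq, Prod.mk.injEq] at h
        obtain ⟨_, rfl, rfl⟩ := h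
        have hde : depsOf l a = [] := List.isEmpty_iff.mp hdeps
        rw [hde]
        have hfin : finalizeB l a lv = some (lv.insert a 0) := by
          unfold finalizeB
          rw [if_pos hdeps]
        rw [loopB_fin l a frames lv (lv.insert a 0) (PySem.Set.add ip a) hfin]
        rw [discard_add ip a hnip]
      · have hdeps' : (depsOf l a).isEmpty = false := by
          cases hb : (depsOf l a).isEmpty with
          | false => rfl
          | true => exact absurd hb hdeps
        simp only [getLevelA, hvis', Bool.false_eq_true, if_false, hdeps'] at h
        cases hd : depLevelsA l f (depsOf l a) lv (PySem.Set.add vis a) with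
        | none => rw [hd] at h; cases h
        | some r =>
            obtain ⟨vals, lv1', vis1'⟩ := r
            rw [hd] at h
            dsimp only at h
            cases hm : PySem.List.max? vals (fun x => x) with
            | none => rw [hm] at h; cases h
            | some m =>
                rw [hm] at h
                dsimp only at h
                simp only [Option.some.injEq, Prod.mk.injEq] at h
                obtain ⟨_, rfl, rfl⟩ := h
                -- invariants at (lv, add vis a, add ip a)
                have hvis2 : ∀ k, k ∈ PySem.Set.add vis a ↔
                    (lv.contains k = true ∨ k ∈ PySem.Set.add ip a) := by
                  intro k
                  rw [PySem.Set.mem_add, PySem.Set.mem_add]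
                  constructor
                  · rintro (hk | rfl)
                    · rcases (hvis k).mp hk with hh | hh
                      · exact Or.inl hh
                      · exact Or.inr (Or.inl hh)
                    · exact Or.inr (Or.inr rfl)
                  · rintro (hk | hk | rfl)
                    · exact Or.inl ((hvis k).mpr (Or.inl hk))
                    · exact Or.inl ((hvis k).mpr (Or.inr hk))
                    · exact Or.inr rfl
                have hdis2 : ∀ k, k ∈ PySem.Set.add ip a → lv.contains k = false := by
                  intro k hk
                  rcases (PySem.Set.mem_add ip a k).mp hk with hk' | rfl
                  · exact hdis k hk'
                  · exact hlva
                obtain ⟨c1, c2⟩ := SimD_of l f ihf (depsOf l a) a frames lv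
                  (PySem.Set.add vis a) (PySem.Set.add ip a) vals lv1' vis1' hd hvis2 hdis2
                rw [c1]
                have hfin : finalizeB l a lv1' = some (lv1'.insert a (m + 1)) := by
                  unfold finalizeB
                  rw [if_neg (by rw [hdeps']; exact Bool.false_ne_true)]
                  rw [← c2, hm]
                rw [loopB_fin l a frames lv1' (lv1'.insert a (m + 1)) (PySem.Set.add ip a) hfin]
                rw [discard_add ip a hnip]

-- top level: the two driver loops agree
theorem top_sim (l : List (String × List String)) (hpre : Pre_calculate_build_levels l) :
    ∀ roots lv vis, (∀ r ∈ roots, r ∈ l.map Prod.fst) →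
    (∀ k, k ∈ vis ↔ lv.contains k = true) →
    ∃ lv' vis', runA l roots lv vis = some (lv', vis') ∧
      runRootsB l roots lv PySem.Set.empty = some (lv', PySem.Set.empty) := by
  intro roots
  induction roots with
  | nil =>
      intro lv vis _ _
      exact ⟨lv, vis, by simp [runA], by simp [runRootsB]⟩
  | cons r rs ih =>
      intro lv vis hmem hinv
      have hsub : ∀ k, lv.contains k = true → k ∈ vis := fun k hk => (hinv k).mpr hk
      by_cases hc : lv.contains r = true
      · have hrv : r ∈ vis := hsub r hc
        have hrvc : PySem.Set.contains vis r = true := (mem_contains vis r).mpr hrv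
        have hg : getLevelA l (l.length + 1) r lv vis = some (lv.getD r 0, lv, vis) := by
          simp [getLevelA, hrvc, hrv]
        obtain ⟨lv', vis', hA, hB⟩ := ih lv vis (fun x hx => hmem x (List.mem_cons_of_mem _ hx)) hinv
        refine ⟨lv', vis', ?_, ?_⟩
        · simp only [runA]
          rw [hg]
          exact hA
        · simp only [runRootsB, hc, if_true]
          exact hB
      · have hc' : lv.contains r = false := by
          cases hb : lv.contains r with
          | false => rfl
          | true => exact absurd hb hc
        have hrn : r ∉ vis := fun hm => by
          rw [(hinv r).mp hm] at hc'; cases hc'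
        have hU : UA l vis < l.length + 1 := by
          have h1 : UA l vis ≤ (PySem.List.dedup (l.map Prod.fst)).length := by
            unfold UA
            exact List.length_filter_le _ _
          have h2 : (PySem.List.dedup (l.map Prod.fst)).length ≤ (l.map Prod.fst).length := by
            rw [PySem.List.dedup_eq_ofList]
            exact PySem.Set.length_ofList_le _
          rw [List.length_map] at h2
          omega
        obtain ⟨⟨v, lv1, vis1⟩, hg⟩ := SgA_all l (l.length + 1) hpre r lv vis
          (hmem r List.mem_cons_self) hU hsub
        have hvisE : ∀ k, k ∈ vis ↔ (lv.contains k = true ∨ k ∈ (PySem.Set.empty : PySem.Set String)) := by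
          intro k
          rw [hinv k]
          simp [PySem.Set.empty]
        have hdisE : ∀ k, k ∈ (PySem.Set.empty : PySem.Set String) → lv.contains k = false := by
          intro k hk
          simp [PySem.Set.empty] at hk
        have hsim := SimG_all l (l.length + 1) r lv vis v lv1 vis1 PySem.Set.empty []
          hg hrn hvisE hdisE
        obtain ⟨g1, g2, g3, g4, g5, g6⟩ := PgA_all l (l.length + 1) r lv vis v lv1 vis1 hg hsub
        have hinv1 : ∀ k, k ∈ vis1 ↔ lv1.contains k = true := by
          intro k
          constructor
          · intro hk
            by_cases hkv : k ∈ vis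
            · exact (g3 k).mpr (Or.inl ((hinv k).mp hkv))
            · exact (g3 k).mpr (Or.inr ⟨hk, hkv⟩)
          · intro hk
            rcases (g3 k).mp hk with hh | ⟨hh, _⟩
            · exact g2 k ((hinv k).mpr hh)
            · exact hh
        obtain ⟨lv', vis', hA, hB⟩ := ih lv1 vis1
          (fun x hx => hmem x (List.mem_cons_of_mem _ hx)) hinv1
        refine ⟨lv', vis', ?_, ?_⟩
        · simp only [runA]
          rw [hg]
          exact hA
        · simp only [runRootsB, hc', Bool.false_eq_true, if_false]
          rw [hsim, loopB_nil]
          exact hB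

-- ===== VERDICT (by name: the statement is the Claim_ definition above) =====
theorem calculate_build_levels_spec : Claim_equal_calculate_build_levels := by
  intro l _ hpre
  unfold Spec_calculate_build_levels calculate_build_levels calculate_build_levels_alt
  obtain ⟨lv', vis', hA, hB⟩ := top_sim l hpre (l.map Prod.fst) PySem.Dict.empty
    PySem.Set.empty (fun r hr => hr) (by simp [PySem.Set.empty, PySem.Dict.contains_empty])
  rw [hA, hB]
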